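-- pv_equiv track=rewrite | github.com/21sean/Beginner_python | hurray.py | hurray
-- ===== SOURCE A (Python) =====
-- def hurray (n):
--     """Count from 0 to n, inclusive, marking the powers of 2 with 'hurray'.
--
--     As you pass a number that is not a power of 2, print it.
--     As you pass a power of 2, instead print 'hurray'.
--     To simplify, you will not add any white space to the string.
--
--     >>> hurray (1)
--     0hurray
--
--     >>> hurray (2)
--     0hurrayhurray
--
--     >>> hurray (7)
--     0hurrayhurray3hurray567
--
--     Params: n (int) n>=0
--     Returns: (str) the integers 0 through n (inclusive)
--                    with 'hurray' replacing each power of 2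
--     """
--     hurray = ""
--     for i in range(n + 1):
--         if ((i != 0) and not (i & (i - 1))):
--             hurray += "hurray"
--         else:
--             hurray += str(i)
--     return(hurray)
-- ===== SOURCE B (Python) =====
-- def hurray(n):
--     parts = [str(i) for i in range(n + 1)]
--     p = 1
--     while p <= n:
--         parts[p] = "hurray"
--         p *= 2
--     return "".join(parts)
-- ===== Notes on version B (the rewrite author's own statement) =====
-- stated objective: alternative
-- what changed: Instead of testing every index with the bitwise power-of-two trick while concatenating strings, B builds the list of decimal strings once, overwrites exactly the power-of-two positions by a separate repeated-doubling pass (p=1,2,4,...), and joins at the end.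
import Mathlib
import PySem

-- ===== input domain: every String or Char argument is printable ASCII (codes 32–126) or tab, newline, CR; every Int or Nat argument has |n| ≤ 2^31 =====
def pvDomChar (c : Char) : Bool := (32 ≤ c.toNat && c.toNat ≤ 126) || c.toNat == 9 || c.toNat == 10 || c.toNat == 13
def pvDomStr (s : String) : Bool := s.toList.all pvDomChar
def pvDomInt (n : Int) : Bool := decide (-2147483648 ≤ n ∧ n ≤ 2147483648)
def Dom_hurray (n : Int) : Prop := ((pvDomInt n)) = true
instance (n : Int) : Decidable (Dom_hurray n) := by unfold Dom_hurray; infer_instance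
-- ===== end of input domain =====

-- B replaces A's per-element bitwise power-of-two test during string accumulation by a prebuilt
-- list of decimal strings, a separate repeated-doubling pass overwriting the power positions,
-- and a final join (objective: alternative).

-- ===== PORT A =====
def hurray (n : Int) : String :=
  (PySem.List.pyRange 0 (n + 1) 1).foldl
    (fun s i =>
      if i ≠ 0 ∧ PySem.Int.band i (i - 1) = 0 then s ++ "hurray"
      else s ++ PySem.Int.toStr i) ""

-- ===== PORT B =====
-- the 'while p <= n: parts[p] = "hurray"; p *= 2' loop of Source B (the 1 ≤ p conjunct is a
-- totality guard only: every call has p ≥ 1, starting from p = 1)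
def markPows (parts : List String) (p n : Int) : List String :=
  if h : 1 ≤ p ∧ p ≤ n then markPows (parts.set p.toNat "hurray") (2 * p) n else parts
termination_by (n + 1 - p).toNat
decreasing_by omega

def hurray_alt (n : Int) : String :=
  PySem.Str.join "" (markPows ((PySem.List.pyRange 0 (n + 1) 1).map PySem.Int.toStr) 1 n)

-- ===== PRECONDITION & SPEC =====
def Spec_hurray (n : Int) (out : String) : Prop := out = hurray_alt n
instance (n : Int) (out : String) : Decidable (Spec_hurray n out) := by unfold Spec_hurray; infer_instance

-- ===== CLAIM (what is proved, stated in full; the proofs are below) =====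
def Claim_equal_hurray : Prop := ∀ (n : Int), Dom_hurray n → Spec_hurray n (hurray n)

-- ===== LEMMAS AND PROOFS =====

-- powers of two are exactly the positive numbers with m &&& (m-1) = 0
theorem land_pred_eq_zero_iff (m : Nat) (hm : 0 < m) :
    m &&& (m - 1) = 0 ↔ ∃ k : Nat, m = 2 ^ k := by
  induction m using Nat.strong_induction_on with
  | _ m ih =>
    rcases Nat.even_or_odd m with ⟨j, hj⟩ | ⟨j, hj⟩
    · have hj1 : 1 ≤ j := by omega
      have ihj := ih j (by omega) (by omega)
      have key : m &&& (m - 1) = 2 * (j &&& (j - 1)) := by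
        have h1 : m = Nat.bit false j := by simp [Nat.bit_val]; omega
        have h2 : m - 1 = Nat.bit true (j - 1) := by simp [Nat.bit_val]; omega
        rw [h2, h1, Nat.land_bit]
        simp [Nat.bit_val]
      rw [key]
      constructor
      · intro h
        obtain ⟨k, hk⟩ := ihj.mp (by omega)
        exact ⟨k + 1, by rw [hj, hk, pow_succ]; ring⟩
      · rintro ⟨k, hk⟩
        cases k with
        | zero => omega
        | succ k =>
          rw [pow_succ] at hk
          have hjk : j = 2 ^ k := by omega
          have := ihj.mpr ⟨k, hjk⟩
          omega
    · by_cases hj0 : j = 0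
      · have hm1 : m = 1 := by omega
        subst hm1
        constructor
        · intro _; exact ⟨0, rfl⟩
        · intro _; decide
      · have key : m &&& (m - 1) = 2 * j := by
          have h1 : m = Nat.bit true j := by simp [Nat.bit_val]; omega
          have h2 : m - 1 = Nat.bit false j := by simp [Nat.bit_val]; omega
          rw [h2, h1, Nat.land_bit]
          simp [Nat.bit_val]
        constructor
        · intro h; rw [key] at h; omega
        · rintro ⟨k, hk⟩
          cases k with
          | zero => omega
          | succ k => rw [pow_succ] at hk; omega

theorem markPows_length (parts : List String) (p n : Int) :
    (markPows parts p n).length = parts.length := by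
  induction parts, p using markPows.induct n with
  | case1 parts p h ih => rw [markPows, dif_pos h]; simp at ih ⊢; omega
  | case2 parts p h => rw [markPows, dif_neg h]

theorem markPows_getElem?_notpow (parts : List String) (p n : Int) (hp : 1 ≤ p) (j : Nat)
    (hj : ¬ ∃ k : Nat, (j : Int) = p * 2 ^ k ∧ (j : Int) ≤ n) :
    (markPows parts p n)[j]? = parts[j]? := by
  induction parts, p using markPows.induct n with
  | case1 parts p h ih =>
    rw [markPows, dif_pos h]
    have hrec : ¬ ∃ k : Nat, (j : Int) = 2 * p * 2 ^ k ∧ (j : Int) ≤ n := by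
      rintro ⟨k, hk, hkn⟩
      exact hj ⟨k + 1, by rw [hk, pow_succ]; ring, hkn⟩
    rw [ih (by omega) hrec]
    apply List.getElem?_set_ne
    intro hji
    exact hj ⟨0, by simp; omega, by omega⟩
  | case2 parts p h => rw [markPows, dif_neg h]

theorem markPows_getElem?_pow (parts : List String) (p n : Int) (hp : 1 ≤ p)
    (hlen : n < (parts.length : Int)) (j : Nat)
    (hj : ∃ k : Nat, (j : Int) = p * 2 ^ k ∧ (j : Int) ≤ n) :
    (markPows parts p n)[j]? = some "hurray" := by
  induction parts, p using markPows.induct n with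
  | case1 parts p h ih =>
    rw [markPows, dif_pos h]
    obtain ⟨k, hk, hkn⟩ := hj
    cases k with
    | zero =>
      have hjp : (j : Int) = p := by simpa using hk
      have hrec : ¬ ∃ k : Nat, (j : Int) = 2 * p * 2 ^ k ∧ (j : Int) ≤ n := by
        rintro ⟨k, hk2, -⟩
        have h1 : (1 : Int) ≤ 2 ^ k := one_le_pow₀ (by norm_num)
        nlinarith [hk2, hjp]
      rw [markPows_getElem?_notpow _ _ _ (by omega) j hrec]
      have hje : j = p.toNat := by omega
      subst hje
      exact List.getElem?_set_self (by omega)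
    | succ k =>
      apply ih (by omega) (by simpa using hlen)
      refine ⟨k, ?_, hkn⟩
      rw [hk, pow_succ]; ring
  | case2 parts p h =>
    exfalso
    obtain ⟨k, hk, hkn⟩ := hj
    have h1 : (1 : Int) ≤ 2 ^ k := one_le_pow₀ (by norm_num)
    have h2 : p ≤ p * 2 ^ k := le_mul_of_one_le_right (by omega) h1
    omega

-- the bit test of A recognises exactly the power positions B's doubling pass overwrites
theorem bit_test_iff (j : Nat) :
    ((j : Int) ≠ 0 ∧ PySem.Int.band (j : Int) ((j : Int) - 1) = 0) ↔ ∃ k : Nat, j = 2 ^ k := by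
  constructor
  · rintro ⟨hj0, hband⟩
    have hj1 : 1 ≤ j := by omega
    have hc : ((j : Int)) - 1 = ((j - 1 : Nat) : Int) := by omega
    rw [hc, PySem.Int.band_natCast] at hband
    have : j &&& (j - 1) = 0 := by exact_mod_cast hband
    exact (land_pred_eq_zero_iff j (by omega)).mp this
  · rintro ⟨k, hk⟩
    have hj1 : 1 ≤ j := by rw [hk]; exact Nat.one_le_two_pow
    refine ⟨by omega, ?_⟩
    have hc : ((j : Int)) - 1 = ((j - 1 : Nat) : Int) := by omega
    rw [hc, PySem.Int.band_natCast]
    have : j &&& (j - 1) = 0 := (land_pred_eq_zero_iff j (by omega)).mpr ⟨k, hk⟩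
    exact_mod_cast this

theorem markPows_eq_map (n : Int) (hn : 0 ≤ n) :
    markPows ((PySem.List.pyRange 0 (n + 1) 1).map PySem.Int.toStr) 1 n
      = (PySem.List.pyRange 0 (n + 1) 1).map
          (fun i => if i ≠ 0 ∧ PySem.Int.band i (i - 1) = 0 then "hurray" else PySem.Int.toStr i) := by
  have hN : ((n + 1).toNat : Int) = n + 1 := by omega
  have hcast : (n + 1 : Int) = ((n + 1).toNat : Nat) := by omega
  apply List.ext_getElem?
  intro j
  by_cases hjN : j < (n + 1).toNat
  · have hrhs : ((PySem.List.pyRange 0 (n + 1) 1).map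
        (fun i => if i ≠ 0 ∧ PySem.Int.band i (i - 1) = 0 then "hurray" else PySem.Int.toStr i))[j]?
        = some (if (j : Int) ≠ 0 ∧ PySem.Int.band (j : Int) ((j : Int) - 1) = 0
                then "hurray" else PySem.Int.toStr (j : Int)) := by
      rw [hcast]
      exact PySem.List.getElem?_map_pyRange_zero _ _ _ hjN
    have hparts : ((PySem.List.pyRange 0 (n + 1) 1).map PySem.Int.toStr)[j]?
        = some (PySem.Int.toStr (j : Int)) := by
      rw [hcast]
      exact PySem.List.getElem?_map_pyRange_zero _ _ _ hjN
    have hlen : n < ((((PySem.List.pyRange 0 (n + 1) 1).map PySem.Int.toStr)).length : Int) := by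
      rw [List.length_map, PySem.List.length_pyRange_one]
      omega
    by_cases hpow : ∃ k : Nat, j = 2 ^ k
    · rw [markPows_getElem?_pow _ _ _ (by omega) hlen j ?_, hrhs]
      · rw [if_pos ((bit_test_iff j).mpr hpow)]
      · obtain ⟨k, hk⟩ := hpow
        exact ⟨k, by rw [hk]; push_cast; ring, by omega⟩
    · rw [markPows_getElem?_notpow _ _ _ (by omega) j ?_, hparts, hrhs]
      · rw [if_neg (fun hc => hpow ((bit_test_iff j).mp hc))]
      · rintro ⟨k, hk, -⟩
        refine hpow ⟨k, ?_⟩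
        have : (j : Int) = ((2 ^ k : Nat) : Int) := by rw [hk]; push_cast; ring
        exact_mod_cast this
  · rw [List.getElem?_eq_none, List.getElem?_eq_none]
    · simp [PySem.List.length_pyRange_one]; omega
    · rw [markPows_length]; simp [PySem.List.length_pyRange_one]; omega

theorem foldl_strAppend {α : Type} (l : List α) (g : α → String) (acc : String) :
    (l.foldl (fun s x => s ++ g x) acc).toList
      = acc.toList ++ l.flatMap (fun x => (g x).toList) := by
  induction l generalizing acc with
  | nil => simp
  | cons a t ih => simp [ih]

theorem chars_join_nil_eq_flatten (css : List (List Char)) :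
    PySem.Chars.join [] css = css.flatten := by
  induction css with
  | nil => simp [PySem.Chars.join_nil]
  | cons p rest ih =>
    cases rest with
    | nil => simp [PySem.Chars.join_singleton]
    | cons q r => rw [PySem.Chars.join_cons_cons]; simp [ih]

-- ===== VERDICT (by name: the statement is the Claim_ definition above) =====
theorem hurray_spec : Claim_equal_hurray := by
  intro n _
  unfold Spec_hurray hurray hurray_alt
  have hfun : (fun (s : String) (i : Int) =>
        if i ≠ 0 ∧ PySem.Int.band i (i - 1) = 0 then s ++ "hurray" else s ++ PySem.Int.toStr i)
      = (fun (s : String) (i : Int) =>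
        s ++ (if i ≠ 0 ∧ PySem.Int.band i (i - 1) = 0 then "hurray" else PySem.Int.toStr i)) := by
    funext s i
    by_cases h : i ≠ 0 ∧ PySem.Int.band i (i - 1) = 0 <;> simp [h]
  by_cases hn : 0 ≤ n
  · apply String.toList_inj.mp
    rw [hfun, foldl_strAppend, markPows_eq_map n hn, PySem.Str.toList_join]
    simp [chars_join_nil_eq_flatten, List.flatMap]
    rfl
  · have hnil : PySem.List.pyRange 0 (n + 1) 1 = [] :=
      PySem.List.pyRange_one_eq_nil (by omega)
    rw [hnil]
    rw [markPows, dif_neg (by omega)]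
    simp
    rfl
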